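-- pv_equiv track=rewrite | github.com/bermec/challenges | challenges_complete/challenge101_easybonus.py | no_repeat
-- ===== SOURCE A (Python) =====
-- def no_repeat(n, n2):
--
--     accum = 0
--     accum2 = 0
--     longest_seq = 0
--     longest_seq2 = 0
--     sett = set()
--     for x in range(n, n2 + 1):
--         x = str(x)
--         for digit in x:
--             sett.add(int(digit))
--
--         if len(str(n)) == len(sett):
--             accum2 = 0
--             accum += 1
--             if accum > longest_seq:
--                 longest_seq = accum
--             sett = set()
--         else:
--             accum= 0
--             accum2 += 1
--             if accum2 > longest_seq2:
--                 longest_seq2 = accum2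
--             sett = set()
--     return (longest_seq, longest_seq2)
-- ===== SOURCE B (Python) =====
-- def no_repeat(n, n2):
--     target = len(str(n))
--     flags = [len({int(d) for d in str(x)}) == target for x in range(n, n2 + 1)]
--     best_t = best_f = 0
--     i, m = 0, len(flags)
--     while i < m:
--         j = i + 1
--         while j < m and flags[j] == flags[i]:
--             j += 1
--         if flags[i]:
--             best_t = max(best_t, j - i)
--         else:
--             best_f = max(best_f, j - i)
--         i = j
--     return (best_t, best_f)
-- ===== Notes on version B (the rewrite author's own statement) =====
-- stated objective: alternative
-- what changed: B precomputes the per-number boolean flag list once and then scans it run-by-run (span over each maximal group, taking the max run length per flag value), replacing A's element-wise dual run counters with inline digit-set bookkeeping.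
import Mathlib
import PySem

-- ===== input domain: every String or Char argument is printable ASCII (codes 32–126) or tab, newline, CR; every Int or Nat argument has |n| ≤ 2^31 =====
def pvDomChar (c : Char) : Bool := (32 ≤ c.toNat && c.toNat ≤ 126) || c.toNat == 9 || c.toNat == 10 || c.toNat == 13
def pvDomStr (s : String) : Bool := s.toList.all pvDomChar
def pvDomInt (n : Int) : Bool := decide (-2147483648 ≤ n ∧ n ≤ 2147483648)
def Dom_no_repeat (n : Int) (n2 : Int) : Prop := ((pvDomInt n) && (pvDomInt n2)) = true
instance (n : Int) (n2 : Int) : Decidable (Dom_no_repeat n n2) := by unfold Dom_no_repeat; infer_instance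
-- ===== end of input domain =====

-- B replaces A's element-wise dual run counters by a precomputed flag list scanned run-by-run; equal return values on Pre_ (alternative decomposition, no speed claim).

-- ===== PORT A =====
-- int(digit) ported as (ofStr? …).getD 0: exact whenever the char is a decimal digit,
-- which holds for every x ≥ 0; Pre_ excludes negative x (there Python raises ValueError).
def no_repeat (n : Int) (n2 : Int) : Int × Int :=
  let st := (PySem.List.pyRange n (n2 + 1) 1).foldl
    (fun (s : Int × Int × Int × Int × PySem.Set Int) x =>
      let accum := s.1; let accum2 := s.2.1; let ls := s.2.2.1; let ls2 := s.2.2.2.1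
      let sett := (PySem.Int.toStr x).toList.foldl
        (fun t d => PySem.Set.add t ((PySem.Int.ofStr? (String.ofList [d])).getD 0)) s.2.2.2.2
      if (PySem.Int.toStr n).length = PySem.Set.len sett then
        let accum2 : Int := 0
        let accum := accum + 1
        let ls := if accum > ls then accum else ls
        (accum, accum2, ls, ls2, PySem.Set.empty)
      else
        let accum : Int := 0
        let accum2 := accum2 + 1
        let ls2 := if accum2 > ls2 then accum2 else ls2
        (accum, accum2, ls, ls2, PySem.Set.empty))
    (0, 0, 0, 0, PySem.Set.empty)
  (st.2.2.1, st.2.2.2.1)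

-- ===== PORT B =====
-- flag(x) = (len({int(d) for d in str(x)}) == target); same digit-conversion note as port A.
def pvFlag (target : Nat) (x : Int) : Bool :=
  PySem.Set.len (PySem.Set.ofList ((PySem.Int.toStr x).toList.map
    (fun d => (PySem.Int.ofStr? (String.ofList [d])).getD 0))) == target

-- the while/while scan of Source B: consume one maximal run per step
def pvGroups : List Bool → Int → Int → Int × Int
  | [], bt, bf => (bt, bf)
  | f :: t, bt, bf =>
    let run : Int := 1 + (t.takeWhile (· == f)).length
    let rest := t.dropWhile (· == f)
    if f then pvGroups rest (max bt run) bf else pvGroups rest bt (max bf run)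
termination_by l _ _ => l.length
decreasing_by
  all_goals
    simp only [List.length_cons]
    exact Nat.lt_succ_of_le (List.length_dropWhile_le _ _)

def no_repeat_alt (n : Int) (n2 : Int) : Int × Int :=
  let target := (PySem.Int.toStr n).length
  let flags := (PySem.List.pyRange n (n2 + 1) 1).map (pvFlag target)
  pvGroups flags 0 0

-- ===== PRECONDITION & SPEC =====
-- Pre_ excludes nonempty ranges starting at a negative n: there Python A (and B) raise
-- ValueError from int('-') on the sign character of str(x).
def Pre_no_repeat (n : Int) (n2 : Int) : Prop := 0 ≤ n ∨ n2 < n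
instance (n : Int) (n2 : Int) : Decidable (Pre_no_repeat n n2) := by unfold Pre_no_repeat; infer_instance
def pvWitness_no_repeat : Int × Int := (8, 12)

def Spec_no_repeat (n : Int) (n2 : Int) (out : Int × Int) : Prop := out = no_repeat_alt n n2
instance (n : Int) (n2 : Int) (out : Int × Int) : Decidable (Spec_no_repeat n n2 out) := by unfold Spec_no_repeat; infer_instance

-- ===== CLAIM (what is proved, stated in full; the proofs are below) =====
def Claim_equal_no_repeat : Prop := ∀ (n : Int) (n2 : Int), Dom_no_repeat n n2 → Pre_no_repeat n n2 → Spec_no_repeat n n2 (no_repeat n n2)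

-- ===== LEMMAS AND PROOFS =====

-- the pure 4-counter step underlying A's loop, with the flag abstracted out
def pvStep (s : Int × Int × Int × Int) : Bool → Int × Int × Int × Int
  | true => (s.1 + 1, 0, max s.2.2.1 (s.1 + 1), s.2.2.2)
  | false => (0, s.2.1 + 1, s.2.2.1, max s.2.2.2 (s.2.1 + 1))

theorem pvStep_run_true (k : Nat) : ∀ (a a2 ls ls2 : Int),
    (List.replicate k true).foldl pvStep (a, a2, ls, ls2)
      = if k = 0 then (a, a2, ls, ls2) else (a + k, 0, max ls (a + k), ls2) := by
  induction k with
  | zero => intro a a2 ls ls2; simp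
  | succ k ih =>
    intro a a2 ls ls2
    rw [List.replicate_succ, List.foldl_cons]
    show (List.replicate k true).foldl pvStep (a + 1, 0, max ls (a + 1), ls2) = _
    rw [ih]
    rcases Nat.eq_zero_or_pos k with hk | hk
    · subst hk; simp
    · simp only [if_neg (Nat.pos_iff_ne_zero.mp hk), if_neg (Nat.succ_ne_zero k)]
      have hle : (a + 1 : Int) ≤ a + 1 + k := by omega
      rw [max_assoc, max_eq_right hle]
      push_cast; ring_nf

theorem pvStep_run_false (k : Nat) : ∀ (a a2 ls ls2 : Int),
    (List.replicate k false).foldl pvStep (a, a2, ls, ls2)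
      = if k = 0 then (a, a2, ls, ls2) else (0, a2 + k, ls, max ls2 (a2 + k)) := by
  induction k with
  | zero => intro a a2 ls ls2; simp
  | succ k ih =>
    intro a a2 ls ls2
    rw [List.replicate_succ, List.foldl_cons]
    show (List.replicate k false).foldl pvStep (0, a2 + 1, ls, max ls2 (a2 + 1)) = _
    rw [ih]
    rcases Nat.eq_zero_or_pos k with hk | hk
    · subst hk; simp
    · simp only [if_neg (Nat.pos_iff_ne_zero.mp hk), if_neg (Nat.succ_ne_zero k)]
      have hle : (a2 + 1 : Int) ≤ a2 + 1 + k := by omega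
      rw [max_assoc, max_eq_right hle]
      push_cast; ring_nf

theorem takeWhile_beq_replicate {f : Bool} (t : List Bool) :
    t.takeWhile (· == f) = List.replicate (t.takeWhile (· == f)).length f := by
  rw [List.eq_replicate_iff]
  refine ⟨rfl, fun b hb => ?_⟩
  have := List.mem_takeWhile_imp hb
  simpa using this

theorem head_dropWhile_beq {f g : Bool} : ∀ (t : List Bool),
    (t.dropWhile (· == f)).head? = some g → g = !f := by
  intro t
  induction t with
  | nil => simp [List.dropWhile]
  | cons b t ih =>
    intro h
    rw [List.dropWhile_cons] at h
    by_cases hb : (b == f) = true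
    · rw [if_pos hb] at h
      exact ih h
    · rw [if_neg hb] at h
      simp only [List.head?_cons, Option.some.injEq] at h
      subst h
      cases b <;> cases f <;> simp_all

-- main correspondence: the counter fold and the run-by-run scan agree on the two maxima
theorem pvMainAux : ∀ (m : Nat) (L : List Bool), L.length ≤ m → ∀ (a a2 ls ls2 : Int),
    (L.head? = some true → a = 0) → (L.head? = some false → a2 = 0) →
    (L.foldl pvStep (a, a2, ls, ls2)).2.2 = pvGroups L ls ls2 := by
  intro m
  induction m with
  | zero =>
    intro L hL a a2 ls ls2 _ _
    have : L = [] := List.eq_nil_of_length_eq_zero (Nat.le_zero.mp hL)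
    subst this
    simp [pvGroups]
  | succ m ih =>
    intro L hL a a2 ls ls2 ht hf
    match L with
    | [] => simp [pvGroups]
    | f :: t =>
      have hdec : f :: t
          = List.replicate ((t.takeWhile (· == f)).length + 1) f ++ t.dropWhile (· == f) := by
        rw [List.replicate_succ, List.cons_append, ← takeWhile_beq_replicate t,
          List.takeWhile_append_dropWhile]
      set k := (t.takeWhile (· == f)).length with hk
      set rest := t.dropWhile (· == f) with hrest
      have hrlen : rest.length ≤ m := by
        rw [hrest]
        have h1 := List.length_dropWhile_le (· == f) t
        simp only [List.length_cons] at hL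
        omega
      cases f with
      | true =>
        have ha : a = 0 := ht rfl
        subst ha
        conv_lhs => rw [hdec, List.foldl_append, pvStep_run_true]
        simp only [if_neg (Nat.succ_ne_zero k)]
        rw [ih rest hrlen _ 0 _ ls2
          (fun h => absurd (head_dropWhile_beq t h) (by simp)) (fun _ => rfl)]
        conv_rhs => rw [pvGroups]
        simp only [← hk, ← hrest]
        congr 1
        push_cast; ring_nf
      | false =>
        have ha2 : a2 = 0 := hf rfl
        subst ha2
        conv_lhs => rw [hdec, List.foldl_append, pvStep_run_false]
        simp only [if_neg (Nat.succ_ne_zero k)]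
        rw [ih rest hrlen 0 _ ls _
          (fun _ => rfl) (fun h => absurd (head_dropWhile_beq t h) (by simp))]
        conv_rhs => rw [pvGroups]
        simp only [← hk, ← hrest, Bool.false_eq_true, if_false]
        congr 1
        push_cast; ring_nf

-- A's 5-component fold (with the scratch set) equals the pure fold over the flag list
theorem pvFold5_eq (n : Int) : ∀ (xs : List Int) (a a2 ls ls2 : Int),
    xs.foldl
      (fun (s : Int × Int × Int × Int × PySem.Set Int) x =>
        let accum := s.1; let accum2 := s.2.1; let ls := s.2.2.1; let ls2 := s.2.2.2.1
        let sett := (PySem.Int.toStr x).toList.foldl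
          (fun t d => PySem.Set.add t ((PySem.Int.ofStr? (String.ofList [d])).getD 0)) s.2.2.2.2
        if (PySem.Int.toStr n).length = PySem.Set.len sett then
          (accum + 1, 0, if accum + 1 > ls then accum + 1 else ls, ls2, PySem.Set.empty)
        else
          (0, accum2 + 1, ls, if accum2 + 1 > ls2 then accum2 + 1 else ls2, PySem.Set.empty))
      (a, a2, ls, ls2, PySem.Set.empty)
      = (let r := (xs.map (pvFlag (PySem.Int.toStr n).length)).foldl pvStep (a, a2, ls, ls2);
         (r.1, r.2.1, r.2.2.1, r.2.2.2, PySem.Set.empty)) := by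
  intro xs
  induction xs with
  | nil => intro a a2 ls ls2; rfl
  | cons x t ih =>
    intro a a2 ls ls2
    rw [List.foldl_cons, List.map_cons, List.foldl_cons]
    have hset : (PySem.Int.toStr x).toList.foldl
        (fun t d => PySem.Set.add t ((PySem.Int.ofStr? (String.ofList [d])).getD 0))
        (PySem.Set.empty : PySem.Set Int)
        = PySem.Set.ofList ((PySem.Int.toStr x).toList.map
            (fun d => (PySem.Int.ofStr? (String.ofList [d])).getD 0)) := by
      rw [PySem.Set.ofList_eq_foldl, ← List.foldl_map]
      rfl
    by_cases hc : ((PySem.Int.toStr n).length : Int) = PySem.Set.len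
        ((PySem.Int.toStr x).toList.foldl
          (fun t d => PySem.Set.add t ((PySem.Int.ofStr? (String.ofList [d])).getD 0))
          (PySem.Set.empty : PySem.Set Int))
    · have hflag : pvFlag (PySem.Int.toStr n).length x = true := by
        simp only [pvFlag, ← hset]
        simp only [beq_iff_eq]
        omega
      simp only [if_pos hc, hflag]
      rw [ih]
      show _ = (let r := _root_.List.foldl pvStep (pvStep (a, a2, ls, ls2) true) _;
        (r.1, r.2.1, r.2.2.1, r.2.2.2, (PySem.Set.empty : PySem.Set Int)))
      simp only [pvStep]
      have hmax : (if a + 1 > ls then a + 1 else ls) = max ls (a + 1) := by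
        rw [max_def]; split_ifs <;> omega
      rw [hmax]
    · have hflag : pvFlag (PySem.Int.toStr n).length x = false := by
        simp only [pvFlag, ← hset]
        simp only [beq_eq_false_iff_ne, ne_eq]
        omega
      simp only [if_neg hc, hflag]
      rw [ih]
      show _ = (let r := _root_.List.foldl pvStep (pvStep (a, a2, ls, ls2) false) _;
        (r.1, r.2.1, r.2.2.1, r.2.2.2, (PySem.Set.empty : PySem.Set Int)))
      simp only [pvStep]
      have hmax : (if a2 + 1 > ls2 then a2 + 1 else ls2) = max ls2 (a2 + 1) := by
        rw [max_def]; split_ifs <;> omega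
      rw [hmax]

-- ===== VERDICT (by name: the statement is the Claim_ definition above) =====
theorem no_repeat_spec : Claim_equal_no_repeat := by
  intro n n2 _ _
  unfold Spec_no_repeat no_repeat no_repeat_alt
  rw [pvFold5_eq n]
  have := pvMainAux ((PySem.List.pyRange n (n2 + 1) 1).map (pvFlag (PySem.Int.toStr n).length)).length
    ((PySem.List.pyRange n (n2 + 1) 1).map (pvFlag (PySem.Int.toStr n).length))
    le_rfl 0 0 0 0 (fun _ => rfl) (fun _ => rfl)
  simpa using this
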